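-- pv_equiv track=rewrite | github.com/Luigii1506/brain-ops | src/brain_ops/services/improve_service.py | _improve_map
-- ===== SOURCE A (Python) =====
-- def _improve_map(title: str, body: str) -> tuple[str, str]:
--     link_lines = [line.strip() for line in body.splitlines() if "[[" in line]
--     purpose = next((line.strip() for line in body.splitlines() if line.strip() and "[[" not in line and not line.strip().startswith("#")), "")
--     if not body or body.startswith("# "):
--         return body, "Map already has heading content."
--     entry_points = link_lines if link_lines else ["- Add related notes here."]
--     return (
--         "\n".join(
--             [
--                 f"# {title}",
--                 "",
--                 "## Purpose",
--                 "",
--                 purpose or f"This map organizes notes related to {title.replace('MOC-', '')}.",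
--                 "",
--                 "## Entry points",
--                 "",
--                 *entry_points,
--                 "",
--                 "## Related notes",
--             ]
--         ),
--         "Wrapped sparse map content into a navigable MOC structure.",
--     )
-- ===== SOURCE B (Python) =====
-- def _scan(lines):
--     # structural recursion: links built front-to-back by consing,
--     # head's purpose overrides the tail's, so the FIRST qualifying line wins
--     if not lines:
--         return [], None
--     rest_links, rest_purpose = _scan(lines[1:])
--     s = lines[0].strip()
--     if "[[" in lines[0]:
--         return [s] + rest_links, rest_purpose
--     if s and not s.startswith("#"):
--         return rest_links, s
--     return rest_links, rest_purpose
--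
--
-- def _improve_map(title: str, body: str) -> tuple[str, str]:
--     if not body or body.startswith("# "):
--         return body, "Map already has heading content."
--     link_lines, purpose = _scan(body.splitlines())
--     if purpose is None:
--         purpose = ""
--     entry_points = link_lines if link_lines else ["- Add related notes here."]
--     return (
--         "\n".join(
--             [
--                 f"# {title}",
--                 "",
--                 "## Purpose",
--                 "",
--                 purpose or f"This map organizes notes related to {title.replace('MOC-', '')}.",
--                 "",
--                 "## Entry points",
--                 "",
--                 *entry_points,
--                 "",
--                 "## Related notes",
--             ]
--         ),
--         "Wrapped sparse map content into a navigable MOC structure.",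
--     )
-- ===== Notes on version B (the rewrite author's own statement) =====
-- stated objective: alternative
-- what changed: Replaces A's two staged passes over body.splitlines() (a filter comprehension for links and a next()-scanned generator for the purpose) with a recursive helper that decomposes the line list structurally: it recurses into the tail, conses link lines at the front, and lets the head's purpose override the tail's so the first qualifying line wins without a sentinel or second scan; the heading guard is hoisted to the top.
import Mathlib
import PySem

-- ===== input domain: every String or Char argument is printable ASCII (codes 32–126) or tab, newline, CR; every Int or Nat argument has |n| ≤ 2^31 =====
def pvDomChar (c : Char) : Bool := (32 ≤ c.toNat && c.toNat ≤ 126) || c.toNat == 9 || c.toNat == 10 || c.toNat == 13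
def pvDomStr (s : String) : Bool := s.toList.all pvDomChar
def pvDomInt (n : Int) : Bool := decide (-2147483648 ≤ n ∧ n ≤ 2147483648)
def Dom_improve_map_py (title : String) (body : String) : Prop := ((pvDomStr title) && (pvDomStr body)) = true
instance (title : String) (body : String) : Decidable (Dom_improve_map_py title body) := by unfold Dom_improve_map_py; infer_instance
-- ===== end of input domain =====

-- B replaces A's two staged passes over the split lines (a filter comprehension and a
-- next()-scanned generator) by a recursive helper that decomposes the line list: links
-- are consed at the front, the head's purpose overrides the tail's (first match wins);
-- same value everywhere (alternative).

-- ===== PORT A =====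
def improve_map_py (title : String) (body : String) : String × String :=
  let lines := PySem.Str.splitlines body
  -- link_lines = [line.strip() for line in body.splitlines() if "[[" in line]
  let link_lines := (lines.filter (fun line => PySem.Str.isIn "[[" line)).map PySem.Str.strip
  -- purpose = next((line.strip() for line in … if line.strip() and "[[" not in line and not line.strip().startswith("#")), "")
  let purpose := ((lines.filter (fun line =>
      !(PySem.Str.len (PySem.Str.strip line) == 0) && !(PySem.Str.isIn "[[" line)
        && !(PySem.Str.startswith (PySem.Str.strip line) "#"))).map PySem.Str.strip).headD ""
  if PySem.Str.len body == 0 || PySem.Str.startswith body "# " then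
    (body, "Map already has heading content.")
  else
    let entry_points := if link_lines ≠ [] then link_lines else ["- Add related notes here."]
    (PySem.Str.join "\n"
      (["# " ++ title, "", "## Purpose", "",
        (if !(PySem.Str.len purpose == 0) then purpose
         else "This map organizes notes related to " ++ PySem.Str.replace title "MOC-" "" ++ "."),
        "", "## Entry points", ""] ++ entry_points ++ ["", "## Related notes"]),
     "Wrapped sparse map content into a navigable MOC structure.")

-- ===== PORT B =====
-- Source B's recursive _scan: recurse into the tail, cons link lines at the front,
-- the head's purpose overrides the tail's.
def pvScan : List String → List String × Option String
  | [] => ([], none)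
  | l :: t =>
    let r := pvScan t
    let s := PySem.Str.strip l
    if PySem.Str.isIn "[[" l then (s :: r.1, r.2)
    else if !(PySem.Str.len s == 0) && !(PySem.Str.startswith s "#") then (r.1, some s)
    else r

def improve_map_py_alt (title : String) (body : String) : String × String :=
  if PySem.Str.len body == 0 || PySem.Str.startswith body "# " then
    (body, "Map already has heading content.")
  else
    let st := pvScan (PySem.Str.splitlines body)
    let link_lines := st.1
    let purpose := st.2.getD ""
    let entry_points := if link_lines ≠ [] then link_lines else ["- Add related notes here."]
    (PySem.Str.join "\n"
      (["# " ++ title, "", "## Purpose", "",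
        (if !(PySem.Str.len purpose == 0) then purpose
         else "This map organizes notes related to " ++ PySem.Str.replace title "MOC-" "" ++ "."),
        "", "## Entry points", ""] ++ entry_points ++ ["", "## Related notes"]),
     "Wrapped sparse map content into a navigable MOC structure.")

-- ===== PRECONDITION & SPEC =====
def Spec_improve_map_py (title : String) (body : String) (out : String × String) : Prop := out = improve_map_py_alt title body
instance (title : String) (body : String) (out : String × String) : Decidable (Spec_improve_map_py title body out) := by unfold Spec_improve_map_py; infer_instance

-- ===== CLAIM =====
def Claim_equal_improve_map_py : Prop := ∀ (title : String) (body : String), Dom_improve_map_py title body → Spec_improve_map_py title body (improve_map_py title body)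

-- ===== LEMMAS AND PROOFS =====

-- B's recursion computes exactly A's two passes: the consed links are A's filtered,
-- stripped link lines in order, and the overriding purpose is the FIRST qualifying line.
theorem pvScan_spec (ls : List String) :
    pvScan ls =
      ((ls.filter (fun line => PySem.Str.isIn "[[" line)).map PySem.Str.strip,
       ((ls.filter (fun line =>
            !(PySem.Str.len (PySem.Str.strip line) == 0) && !(PySem.Str.isIn "[[" line)
              && !(PySem.Str.startswith (PySem.Str.strip line) "#"))).map PySem.Str.strip).head?) := by
  induction ls with
  | nil => simp [pvScan]
  | cons l t ih =>
    simp only [pvScan, ih, List.filter_cons, pysem]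
    by_cases hp : ['[', '['] <:+: l.toList
    · simp [hp, PySem.Chars.isIn_eq_false_iff]
    · by_cases hq : PySem.Chars.strip l.toList = []
      · simp [hp, hq]
      · by_cases hr : PySem.Chars.startswith (PySem.Chars.strip l.toList) ['#'] = true
        · simp [hp, hr]
        · simp only [Bool.not_eq_true] at hr
          simp [hp, hq, hr, List.length_eq_zero_iff, PySem.Chars.isIn_eq_false_iff]

-- ===== VERDICT =====
theorem improve_map_py_spec : Claim_equal_improve_map_py := by
  intro title body _
  unfold Spec_improve_map_py improve_map_py improve_map_py_alt
  rw [pvScan_spec]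
  simp [List.headD_eq_head?_getD]
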